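-- pv_equiv track=rewrite | github.com/deeplethe/ForgeRAG | persistence/vector/chroma.py | _path_ancestors
-- ===== SOURCE A (Python) =====
-- def _path_ancestors(path: str | None) -> list[str]:
--     """Encode a virtual path into the ancestor list used by Chroma's
--     list-typed ``path`` metadata field.
--
--         /agriculture/00.md  →  ["/agriculture", "/agriculture/00.md"]
--         /x.md               →  ["/x.md"]
--         /                   →  []        (root scope = no filter)
--         ""  / None          →  []
--
--     The leaf (longest element) is the canonical "self" path; the rest
--     are its ancestors. This shape is what makes ``$contains`` correctly
--     answer "is scope an ancestor-or-self of this chunk's path?".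
--     """
--     stripped = (path or "").strip("/")
--     if not stripped:
--         return []
--     out: list[str] = []
--     cur = ""
--     for seg in stripped.split("/"):
--         cur += "/" + seg
--         out.append(cur)
--     return out
-- ===== SOURCE B (Python) =====
-- def _path_ancestors(path: str | None) -> list[str]:
--     stripped = (path or "").strip("/")
--     if not stripped:
--         return []
--     segs = stripped.split("/")
--     return ["/" + "/".join(segs[:i + 1]) for i in range(len(segs))]
-- ===== Notes on version B (the rewrite author's own statement) =====
-- stated objective: simpler
-- what changed: Replaces the loop that extends a running accumulator string with a comprehension that rebuilds each ancestor independently by joining a prefix slice of the segment list.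
import Mathlib
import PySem

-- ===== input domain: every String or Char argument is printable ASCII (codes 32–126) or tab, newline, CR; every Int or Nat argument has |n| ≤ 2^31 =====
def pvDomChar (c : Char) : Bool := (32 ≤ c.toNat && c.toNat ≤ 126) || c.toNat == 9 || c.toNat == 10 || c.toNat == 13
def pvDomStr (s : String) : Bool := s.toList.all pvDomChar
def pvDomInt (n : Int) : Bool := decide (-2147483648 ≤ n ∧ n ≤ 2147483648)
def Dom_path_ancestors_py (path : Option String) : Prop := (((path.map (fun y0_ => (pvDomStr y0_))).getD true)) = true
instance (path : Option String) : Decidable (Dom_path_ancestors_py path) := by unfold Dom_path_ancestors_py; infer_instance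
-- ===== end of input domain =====

-- B rebuilds each ancestor from a prefix slice of the segment list instead of A's running accumulator string (objective: simpler).

-- ===== PORT A =====
def path_ancestors_py (path : Option String) : List String :=
  let stripped := PySem.Str.stripChars (path.getD "") "/"
  if stripped = "" then []
  else
    (((PySem.Str.split? stripped "/").getD []).foldl
      (fun (st : List String × String) seg =>
        (st.1 ++ [st.2 ++ ("/" ++ seg)], st.2 ++ ("/" ++ seg))) ([], "")).1

-- ===== PORT B =====
def path_ancestors_py_alt (path : Option String) : List String :=
  let stripped := PySem.Str.stripChars (path.getD "") "/"
  if stripped = "" then []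
  else
    let segs := (PySem.Str.split? stripped "/").getD []
    (PySem.List.pyRange 0 segs.length 1).map
      (fun i => "/" ++ PySem.Str.join "/" (PySem.List.slice segs none (some (i + 1))))

-- ===== PRECONDITION & SPEC =====
def Spec_path_ancestors_py (path : Option String) (out : List String) : Prop := out = path_ancestors_py_alt path
instance (path : Option String) (out : List String) : Decidable (Spec_path_ancestors_py path out) := by unfold Spec_path_ancestors_py; infer_instance

-- ===== CLAIM (what is proved, stated in full; the proofs are below) =====
def Claim_equal_path_ancestors_py : Prop := ∀ (path : Option String), Dom_path_ancestors_py path → Spec_path_ancestors_py path (path_ancestors_py path)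

-- ===== LEMMAS AND PROOFS =====

theorem pv_join_singleton (s a : String) : PySem.Str.join s [a] = a := by
  simp [PySem.Str.join, PySem.Chars.join_singleton]

theorem pv_join_cons (s a : String) (t : List String) (ht : t ≠ []) :
    PySem.Str.join s (a :: t) = a ++ s ++ PySem.Str.join s t := by
  cases t with
  | nil => exact absurd rfl ht
  | cons b l =>
    simp [PySem.Str.join, PySem.Chars.join_cons_cons, String.append_assoc]

theorem pv_foldA (segs : List String) (pre : List String) (cur : String) :
    (segs.foldl
      (fun (st : List String × String) seg =>
        (st.1 ++ [st.2 ++ ("/" ++ seg)], st.2 ++ ("/" ++ seg))) (pre, cur)).1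
    = pre ++ (List.range segs.length).map
        (fun k => cur ++ "/" ++ PySem.Str.join "/" (segs.take (k + 1))) := by
  induction segs generalizing pre cur with
  | nil => simp
  | cons s rest ih =>
    simp only [List.foldl_cons, ih, List.length_cons, List.range_succ_eq_map,
      List.map_cons, List.map_map]
    rw [List.append_assoc]
    congr 1
    simp only [List.take_succ_cons, List.take_zero, pv_join_singleton,
      List.cons_append, List.nil_append, String.append_assoc]
    congr 1
    apply List.map_congr_left
    intro k hk
    have hlen : k < rest.length := List.mem_range.mp hk
    have hne : rest.take (k + 1) ≠ [] := by
      have hl : (rest.take (k + 1)).length = k + 1 := by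
        rw [List.length_take]; omega
      intro hnil
      rw [hnil] at hl
      simp at hl
    simp [Function.comp, pv_join_cons "/" s _ hne, String.append_assoc]

theorem path_ancestors_py_spec' (path : Option String) :
    path_ancestors_py path = path_ancestors_py_alt path := by
  unfold path_ancestors_py path_ancestors_py_alt
  dsimp only
  by_cases h : PySem.Str.stripChars (path.getD "") "/" = ""
  · rw [if_pos h, if_pos h]
  · rw [if_neg h, if_neg h, pv_foldA, PySem.List.pyRange_one]
    simp only [List.nil_append, sub_zero, Int.toNat_natCast, List.map_map]
    apply List.map_congr_left
    intro k hk
    have hcast : ((0 : Int) + (k : Int)) + 1 = ((k + 1 : Nat) : Int) := by push_cast; ring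
    simp only [Function.comp, hcast, PySem.List.slice_to_natCast]
    congr 1

-- ===== VERDICT (by name: the statement is the Claim_ definition above) =====
theorem path_ancestors_py_spec : Claim_equal_path_ancestors_py := by
  intro path _
  exact path_ancestors_py_spec' path
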